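-- pv_equiv track=rewrite | github.com/conjurxed2/UFV-PRACTICAS | DATAMINING/LAB 2/PRACTICA 2/AprioriSeq.py | __CalcularFreqSoporteRefractor
-- ===== SOURCE A (Python) =====
-- def __CalcularFreqSoporteRefractor(Transaccion, Columna):
--     """
--     Función para calcular la frecuencia soporte.
--     :param Item: Item sobre el que se va a calcular.
--     :param Columna: Columna del dataset para calcular la frecuencia soporte.
--     :return: Devuelve la frecuencia soporte.
--     """
--     count = 0
--     for fila in Columna:
--         len_Item = len(Transaccion)
--         items_encontrados = 0
--         indice_temp = 0
--         for item in range(0, len(Transaccion)):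
--             for fila_actual_i in range(indice_temp, len(fila)):
--                 if items_encontrados == len(Transaccion):
--                     break
--                 if Transaccion[item] in fila[fila_actual_i]:
--                     indice_temp = fila_actual_i + 1
--                     items_encontrados += 1
--                     break
--
--         if items_encontrados == len_Item:
--             count += 1
--     return count
-- ===== SOURCE B (Python) =====
-- def __CalcularFreqSoporteRefractor(Transaccion, Columna):
--     # Single two-pointer greedy pass per row: walk the cells once, advancing
--     # one pointer over Transaccion; no per-item rescan of the row.
--     count = 0
--     n = len(Transaccion)
--     for fila in Columna:
--         t = 0
--         for cell in fila:
--             if t == n: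
--                 break
--             if Transaccion[t] in cell:
--                 t += 1
--         if t == n:
--             count += 1
--     return count
-- ===== Notes on version B (the rewrite author's own statement) =====
-- stated objective: faster
-- what changed: Replaces the per-item rescan of the row (outer loop over Transaccion items, inner scan of the row from a saved index for each item) by a single two-pointer greedy pass over the row's cells that advances one pointer over Transaccion.
import Mathlib
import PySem

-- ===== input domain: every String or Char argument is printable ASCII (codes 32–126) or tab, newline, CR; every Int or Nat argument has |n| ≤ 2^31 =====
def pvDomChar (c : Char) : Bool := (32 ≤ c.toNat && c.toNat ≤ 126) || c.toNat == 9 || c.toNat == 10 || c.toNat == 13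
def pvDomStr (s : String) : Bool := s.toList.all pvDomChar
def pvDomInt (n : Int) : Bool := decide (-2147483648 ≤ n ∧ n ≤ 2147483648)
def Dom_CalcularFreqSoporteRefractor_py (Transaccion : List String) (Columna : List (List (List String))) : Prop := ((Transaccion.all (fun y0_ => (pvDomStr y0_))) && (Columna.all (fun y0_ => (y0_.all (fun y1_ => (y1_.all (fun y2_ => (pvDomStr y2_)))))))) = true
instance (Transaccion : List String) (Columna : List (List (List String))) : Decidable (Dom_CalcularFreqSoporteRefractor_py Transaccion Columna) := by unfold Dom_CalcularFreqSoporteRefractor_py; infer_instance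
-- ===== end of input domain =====

-- ===== PORT A =====
-- B changes: one two-pointer greedy pass per row instead of a per-item rescan from a saved index.

-- inner loop: for fila_actual_i in range(indice_temp, len(fila)): break checks + match
def pvInnerA (lenT : Int) (t : String) (fila : List (List String)) :
    List Int → Int × Int → Int × Int
  | [], st => st
  | i :: rest, (found, p) =>
    if found = lenT then (found, p)
    else if ((PySem.List.pyGet? fila i).getD []).contains t then (found + 1, i + 1)
    else pvInnerA lenT t fila rest (found, p)

-- middle loop: for item in range(0, len(Transaccion)):
def pvItemsA (Transaccion : List String) (fila : List (List String)) :
    List Int → Int × Int → Int × Int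
  | [], st => st
  | it :: rest, (found, p) =>
    pvItemsA Transaccion fila rest
      (pvInnerA ((Transaccion.length : Int)) ((PySem.List.pyGet? Transaccion it).getD "")
        fila (PySem.List.pyRange p ((fila.length : Int)) 1) (found, p))

def CalcularFreqSoporteRefractor_py (Transaccion : List String) (Columna : List (List (List String))) : Int :=
  Columna.foldl (fun count fila =>
    let st := pvItemsA Transaccion fila
      (PySem.List.pyRange 0 ((Transaccion.length : Int)) 1) (0, 0)
    if st.1 = (Transaccion.length : Int) then count + 1 else count) 0

-- ===== PORT B =====
-- per-row two-pointer pass: the accumulator is the list of still-unmatched items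
def pvStepB (rem : List String) (cell : List String) : List String :=
  match rem with
  | [] => []
  | t :: ts => if cell.contains t then ts else t :: ts

def CalcularFreqSoporteRefractor_py_alt (Transaccion : List String) (Columna : List (List (List String))) : Int :=
  Columna.foldl (fun count fila =>
    if (fila.foldl pvStepB Transaccion).isEmpty then count + 1 else count) 0

-- ===== PRECONDITION & SPEC =====
def Spec_CalcularFreqSoporteRefractor_py (Transaccion : List String) (Columna : List (List (List String))) (out : Int) : Prop := out = CalcularFreqSoporteRefractor_py_alt Transaccion Columna
instance (Transaccion : List String) (Columna : List (List (List String))) (out : Int) : Decidable (Spec_CalcularFreqSoporteRefractor_py Transaccion Columna out) := by unfold Spec_CalcularFreqSoporteRefractor_py; infer_instance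

-- ===== CLAIM (what is proved, stated in full; the proofs are below) =====
def Claim_equal_CalcularFreqSoporteRefractor_py : Prop := ∀ (Transaccion : List String) (Columna : List (List (List String))), Dom_CalcularFreqSoporteRefractor_py Transaccion Columna → Spec_CalcularFreqSoporteRefractor_py Transaccion Columna (CalcularFreqSoporteRefractor_py Transaccion Columna)

-- ===== LEMMAS AND PROOFS =====

-- structural greedy subsequence predicate (proof-only abstraction)
def pvIsSub : List String → List (List String) → Bool
  | [], _ => true
  | _ :: _, [] => false
  | t :: ts, c :: cs => if c.contains t then pvIsSub ts cs else pvIsSub (t :: ts) cs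

-- abstract middle loop over the remaining items, mirroring pvItemsA
def pvProc (fila : List (List String)) (lenT : Int) : List String → Int × Int → Int × Int
  | [], st => st
  | t :: ts, (found, p) =>
    pvProc fila lenT ts
      (pvInnerA lenT t fila (PySem.List.pyRange p ((fila.length : Int)) 1) (found, p))

lemma foldB_isEmpty (cells : List (List String)) :
    ∀ rem : List String, (cells.foldl pvStepB rem).isEmpty = pvIsSub rem cells := by
  induction cells with
  | nil => intro rem; cases rem <;> rfl
  | cons c cs ih =>
    intro rem
    cases rem with
    | nil => simp [List.foldl, pvStepB, pvIsSub, ih]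
    | cons t ts =>
      simp only [List.foldl, pvStepB, pvIsSub]
      by_cases h : t ∈ c <;> simp [List.contains_eq_mem, h, ih]

-- inner-loop characterisation: scanning from index p finds the first matching cell
lemma inner_char (t : String) (fila : List (List String)) (lenT : Int) :
    ∀ d p : Nat, fila.length - p = d → p ≤ fila.length →
    ∀ found q : Int, found ≠ lenT →
    pvInnerA lenT t fila (PySem.List.pyRange (p : Int) ((fila.length : Int)) 1) (found, q) =
      match ((fila.drop p).findIdx? (fun c => c.contains t)) with
      | some k => (found + 1, ((p + k : Nat) : Int) + 1)
      | none => (found, q) := by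
  intro d
  induction d with
  | zero =>
    intro p hd hp found q hne
    have hp' : p = fila.length := by omega
    subst hp'
    have hemp : PySem.List.pyRange ((fila.length : Nat) : Int) ((fila.length : Int)) 1 = [] := by
      rw [PySem.List.pyRange_one]; simp
    rw [hemp]
    simp [pvInnerA, List.drop_length]
  | succ d ih =>
    intro p hd hp found q hne
    have hlt : p < fila.length := by omega
    rw [PySem.List.pyRange_one_cons (by omega)]
    have hdrop : fila.drop p = fila[p] :: fila.drop (p + 1) :=
      List.drop_eq_getElem_cons hlt
    have hget : (PySem.List.pyGet? fila ((p : Nat) : Int)).getD [] = fila[p] := by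
      simp [PySem.List.pyGet?_natCast, List.getElem?_eq_getElem hlt]
    simp only [pvInnerA, if_neg hne, hget]
    by_cases hc : (fila[p]).contains t = true
    · rw [if_pos hc, hdrop, List.findIdx?_cons, if_pos hc]
      simp
    · rw [if_neg hc]
      have h1 : ((p : Int) + 1) = (((p + 1 : Nat)) : Int) := by push_cast; ring
      rw [h1, ih (p + 1) (by omega) (by omega) found q hne, hdrop, List.findIdx?_cons,
        if_neg hc]
      cases hfi : (fila.drop (p + 1)).findIdx? (fun c => c.contains t) with
      | none => rfl
      | some k =>
        simp only [Option.map_some]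
        have h2 : p + 1 + k = p + (k + 1) := by omega
        rw [h2]

-- greedy lemmas about pvIsSub
lemma isSub_of_findIdx?_none (t : String) (ts : List String) :
    ∀ l : List (List String), l.findIdx? (fun c => c.contains t) = none →
    pvIsSub (t :: ts) l = false := by
  intro l
  induction l with
  | nil => intro _; rfl
  | cons c cs ih =>
    intro h
    rw [List.findIdx?_cons] at h
    by_cases hc : c.contains t = true
    · rw [if_pos hc] at h; exact absurd h (by simp)
    · rw [if_neg hc] at h
      have hcs : cs.findIdx? (fun c => c.contains t) = none := by
        cases hfi : cs.findIdx? (fun c => c.contains t) with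
        | none => rfl
        | some k => rw [hfi] at h; simp at h
      have hstep : pvIsSub (t :: ts) (c :: cs) = pvIsSub (t :: ts) cs := by
        simp only [pvIsSub]; rw [if_neg hc]
      rw [hstep]; exact ih hcs

lemma isSub_of_findIdx?_some (t : String) (ts : List String) :
    ∀ (l : List (List String)) (k : Nat), l.findIdx? (fun c => c.contains t) = some k →
    pvIsSub (t :: ts) l = pvIsSub ts (l.drop (k + 1)) := by
  intro l
  induction l with
  | nil => intro k h; simp at h
  | cons c cs ih =>
    intro k h
    rw [List.findIdx?_cons] at h
    by_cases hc : c.contains t = true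
    · rw [if_pos hc] at h
      obtain rfl : (0 : Nat) = k := by simpa using h
      simp only [pvIsSub]
      rw [if_pos hc]
      simp
    · rw [if_neg hc] at h
      cases hfi : cs.findIdx? (fun c => c.contains t) with
      | none => rw [hfi] at h; simp at h
      | some k' =>
        rw [hfi] at h
        simp only [Option.map_some, Option.some.injEq] at h
        subst h
        simp only [pvIsSub]
        rw [if_neg hc, List.drop_succ_cons]
        exact ih k' hfi

lemma findIdx?_some_lt {l : List (List String)} {P : List String → Bool} {k : Nat}
    (h : l.findIdx? P = some k) : k < l.length := by
  rw [List.findIdx?_eq_some_iff_getElem] at h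
  exact h.1

-- main invariant for the (abstract) middle loop
lemma proc_char (fila : List (List String)) (n : Nat) :
    ∀ (rs : List String) (found : Int) (p : Nat),
    p ≤ fila.length → found + rs.length ≤ (n : Int) →
    ((pvProc fila ((n : Int)) rs (found, (p : Int))).1 = (n : Int) ↔
      (found + rs.length = (n : Int) ∧ pvIsSub rs (fila.drop p) = true)) := by
  intro rs
  induction rs with
  | nil =>
    intro found p hp hle
    simp [pvProc, pvIsSub]
  | cons t ts ih =>
    intro found p hp hle
    have hne : found ≠ ((n : Int)) := by
      simp only [List.length_cons] at hle
      push_cast at hle ⊢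
      omega
    simp only [pvProc]
    rw [inner_char t fila ((n : Int)) (fila.length - p) p rfl hp found ((p : Nat) : Int) hne]
    cases hfi : (fila.drop p).findIdx? (fun c => c.contains t) with
    | none =>
      simp only
      rw [ih found p hp (by simp only [List.length_cons] at hle; push_cast at hle ⊢; omega)]
      rw [isSub_of_findIdx?_none t ts _ hfi]
      simp only [List.length_cons]
      constructor
      · rintro ⟨h1, _⟩
        exfalso
        simp only [List.length_cons] at hle
        push_cast at hle h1
        omega
      · rintro ⟨_, h2⟩; simp at h2
    | some k =>
      have hk : k < (fila.drop p).length := findIdx?_some_lt hfi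
      simp only [List.length_drop] at hk
      have hpk : p + k + 1 ≤ fila.length := by omega
      simp only
      have hcast : (((p + k : Nat) : Int) + 1) = (((p + k + 1 : Nat)) : Int) := by push_cast; ring
      rw [hcast, ih (found + 1) (p + k + 1) hpk
        (by simp only [List.length_cons] at hle; push_cast at hle ⊢; omega)]
      rw [isSub_of_findIdx?_some t ts _ k hfi, List.drop_drop]
      rw [show p + (k + 1) = p + k + 1 from by omega]
      simp only [List.length_cons]
      constructor
      · rintro ⟨h1, h2⟩; exact ⟨by push_cast at h1 ⊢; omega, h2⟩
      · rintro ⟨h1, h2⟩; exact ⟨by push_cast at h1 ⊢; omega, h2⟩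

-- bridge: the ported middle loop over pyRange equals the abstract one over the item list
lemma items_eq_proc (T : List String) (fila : List (List String)) :
    ∀ (d k : Nat), T.length - k = d → k ≤ T.length → ∀ st : Int × Int,
    pvItemsA T fila (PySem.List.pyRange (k : Int) ((T.length : Int)) 1) st =
      pvProc fila ((T.length : Int)) (T.drop k) st := by
  intro d
  induction d with
  | zero =>
    intro k hd hk st
    have : k = T.length := by omega
    subst this
    have hemp : PySem.List.pyRange ((T.length : Nat) : Int) ((T.length : Int)) 1 = [] := by
      rw [PySem.List.pyRange_one]; simp
    rw [hemp]
    simp [pvItemsA, pvProc, List.drop_length]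
  | succ d ih =>
    intro k hd hk st
    have hlt : k < T.length := by omega
    rw [PySem.List.pyRange_one_cons (by omega)]
    obtain ⟨found, p⟩ := st
    have hget : (PySem.List.pyGet? T ((k : Nat) : Int)).getD "" = T[k] := by
      simp [PySem.List.pyGet?_natCast, List.getElem?_eq_getElem hlt]
    have hdrop : T.drop k = T[k] :: T.drop (k + 1) := List.drop_eq_getElem_cons hlt
    simp only [pvItemsA, hget, hdrop, pvProc]
    have h1 : ((k : Int) + 1) = (((k + 1 : Nat)) : Int) := by push_cast; ring
    rw [h1, ih (k + 1) (by omega) (by omega)]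

-- per-row equivalence of the two counting predicates
lemma row_eq (T : List String) (fila : List (List String)) :
    ((pvItemsA T fila (PySem.List.pyRange 0 ((T.length : Int)) 1) (0, 0)).1
      = (T.length : Int)) ↔ (fila.foldl pvStepB T).isEmpty = true := by
  have items := items_eq_proc T fila T.length 0 (by omega) (Nat.zero_le _) (0, 0)
  have key := proc_char fila T.length T 0 0 (Nat.zero_le _) (by simp)
  simp only [Nat.cast_zero, List.drop_zero, zero_add] at items key ⊢
  rw [items, key, foldB_isEmpty]
  simp

-- outer fold congruence
lemma foldl_fun_congr (C : List (List (List String)))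
    (f g : Int → List (List String) → Int) (h : ∀ acc r, f acc r = g acc r) :
    ∀ acc : Int, C.foldl f acc = C.foldl g acc := by
  induction C with
  | nil => intro acc; rfl
  | cons r rs ih => intro acc; simp only [List.foldl, h acc r]; exact ih _

-- ===== VERDICT (by name: the statement is the Claim_ definition above) =====
theorem CalcularFreqSoporteRefractor_py_spec : Claim_equal_CalcularFreqSoporteRefractor_py := by
  intro T C _
  unfold Spec_CalcularFreqSoporteRefractor_py
  unfold CalcularFreqSoporteRefractor_py CalcularFreqSoporteRefractor_py_alt
  refine foldl_fun_congr C _ _ (fun acc fila => ?_) 0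
  show (if (pvItemsA T fila (PySem.List.pyRange 0 (T.length : Int) 1) (0, 0)).1
          = (T.length : Int) then acc + 1 else acc) = _
  by_cases h : (fila.foldl pvStepB T).isEmpty = true
  · rw [if_pos ((row_eq T fila).mpr h), if_pos h]
  · rw [if_neg (fun hh => h ((row_eq T fila).mp hh)), if_neg h]
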